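-- pv_equiv track=rewrite | github.com/VladislavDDD/bh67gitt | lesson 7.py | odd_triangle
-- ===== SOURCE A (Python) =====
-- def odd_triangle(depth):
-- 	trinagle = []
-- 	for i in range(depth):
-- 		line = []
-- 		start = i*(i+1) + 1
-- 		end = start + i * 2 + 1
-- 		for j in range(start, end, 2):
-- 			line.append(j)
-- 		trinagle.append(line)
-- 	return trinagle
-- ===== SOURCE B (Python) =====
-- def odd_triangle(depth):
--     n = max(depth, 0)
--     total = n * (n + 1) // 2
--     odds = [2 * k + 1 for k in range(total)]
--     triangle = []
--     idx = 0
--     for i in range(depth):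
--         triangle.append(odds[idx:idx + i + 1])
--         idx += i + 1
--     return triangle
-- ===== Notes on version B (the rewrite author's own statement) =====
-- stated objective: alternative
-- what changed: Instead of computing per-row start/end bounds and generating each row with an inner stepped range loop, B generates the flat list of the first triangular-number-many odd numbers once and chunks it into rows by slicing with a running index.
import Mathlib
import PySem

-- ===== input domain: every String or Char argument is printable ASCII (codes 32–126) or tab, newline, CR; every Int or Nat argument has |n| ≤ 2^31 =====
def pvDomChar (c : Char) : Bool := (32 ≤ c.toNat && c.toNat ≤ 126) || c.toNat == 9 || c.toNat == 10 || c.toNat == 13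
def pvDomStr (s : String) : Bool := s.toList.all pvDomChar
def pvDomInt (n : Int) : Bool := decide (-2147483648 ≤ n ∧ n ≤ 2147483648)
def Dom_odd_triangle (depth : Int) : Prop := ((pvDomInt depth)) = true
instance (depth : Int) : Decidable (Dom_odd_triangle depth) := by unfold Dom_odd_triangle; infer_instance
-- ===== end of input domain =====

-- B builds the flat list of the first triangular-number-many odd numbers once and chunks it
-- into rows by slicing with a running index, instead of A's per-row start/end arithmetic
-- with an inner step-2 range loop ("alternative": a different decomposition, same cost).

-- ===== PORT A =====
def odd_triangle (depth : Int) : List (List Int) :=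
  (PySem.List.pyRange 0 depth 1).foldl (fun trinagle i =>
    let start := i * (i + 1) + 1
    let stop := start + i * 2 + 1
    let line := (PySem.List.pyRange start stop 2).foldl (fun line j => line ++ [j]) []
    trinagle ++ [line]) []

-- ===== PORT B =====
def odd_triangle_alt (depth : Int) : List (List Int) :=
  let n := max depth 0
  let total := PySem.Int.floordiv (n * (n + 1)) 2
  let odds := (PySem.List.pyRange 0 total 1).map (fun k => 2 * k + 1)
  ((PySem.List.pyRange 0 depth 1).foldl
    (fun (st : List (List Int) × Int) i =>
      (st.1 ++ [PySem.List.slice odds (some st.2) (some (st.2 + i + 1))], st.2 + i + 1))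
    ([], 0)).1

-- ===== PRECONDITION & SPEC =====
def Spec_odd_triangle (depth : Int) (out : List (List Int)) : Prop := out = odd_triangle_alt depth
instance (depth : Int) (out : List (List Int)) : Decidable (Spec_odd_triangle depth out) := by unfold Spec_odd_triangle; infer_instance

-- ===== CLAIM (what is proved, stated in full; the proofs are below) =====
def Claim_equal_odd_triangle : Prop := ∀ (depth : Int), Dom_odd_triangle depth → Spec_odd_triangle depth (odd_triangle depth)

-- ===== LEMMAS AND PROOFS =====

-- canonical row i (i : Nat): the i-th row of the triangle
def pvRow (i : Nat) : List Int :=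
  (List.range (i + 1)).map (fun (k : Nat) => (i : Int) * ((i : Int) + 1) + 1 + 2 * (k : Int))

-- taking a chunk out of [f 0, ..., f (tot-1)]
lemma pvChunk {α : Type} (f : Nat → α) (tot j m : Nat) (h : j + m ≤ tot) :
    (((List.range tot).map f).drop j).take m = (List.range m).map (fun k => f (j + k)) := by
  apply List.ext_getElem
  · simp; omega
  · intro k h1 h2
    simp only [List.getElem_take, List.getElem_drop, List.getElem_map, List.getElem_range]

-- A's fold equals the canonical triangle
lemma pvA_eq (n : Nat) :
    odd_triangle (n : Int) = (List.range n).map pvRow := by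
  unfold odd_triangle
  rw [PySem.List.pyRange_zero_natCast, List.foldl_map]
  have hrow : ∀ (i : Nat),
      (PySem.List.pyRange ((i:Int) * ((i:Int) + 1) + 1)
        ((i:Int) * ((i:Int) + 1) + 1 + (i:Int) * 2 + 1) 2).foldl
        (fun line j => line ++ [j]) [] = pvRow i := by
    intro i
    rw [PySem.List.foldl_append_singleton]
    rw [PySem.List.pyRange_of_pos _ _ (by norm_num)]
    unfold pvRow
    have hlt : (i:Int) * ((i:Int) + 1) + 1 < (i:Int) * ((i:Int) + 1) + 1 + (i:Int) * 2 + 1 := by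
      have : (0:Int) ≤ (i:Int) := Int.natCast_nonneg i
      omega
    rw [if_pos hlt]
    have hcnt : (((i:Int) * ((i:Int) + 1) + 1 + (i:Int) * 2 + 1 - ((i:Int) * ((i:Int) + 1) + 1) + 2 - 1) / 2).toNat = i + 1 := by
      have h2 : ((i:Int) * ((i:Int) + 1) + 1 + (i:Int) * 2 + 1 - ((i:Int) * ((i:Int) + 1) + 1) + 2 - 1) = 2 * (i:Int) + 2 := by ring
      rw [h2]
      omega
    rw [hcnt]
    simp
  induction n with
  | zero => simp
  | succ m ih =>
    rw [List.range_succ, List.foldl_append, ih, List.map_append]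
    simp only [List.foldl_cons, List.foldl_nil, List.map_cons, List.map_nil]
    rw [hrow m]

def pvOdds (tot : Nat) : List Int := (List.range tot).map (fun (k : Nat) => 2 * (k : Int) + 1)

-- B's fold invariant: after n steps the state is (first n rows, n*(n+1)/2)
lemma pvB_fold (tot n : Nat) (h : n * (n + 1) / 2 ≤ tot) :
    (List.range n).foldl
      (fun (st : List (List Int) × Int) (i : Nat) =>
        (st.1 ++ [PySem.List.slice (pvOdds tot) (some st.2) (some (st.2 + (i : Int) + 1))],
         st.2 + (i : Int) + 1))
      ([], 0)
    = ((List.range n).map pvRow, ((n * (n + 1) / 2 : Nat) : Int)) := by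
  induction n with
  | zero => simp
  | succ m ih =>
    have hm : m * (m + 1) / 2 ≤ tot := by
      refine le_trans (Nat.div_le_div_right ?_) h
      exact Nat.mul_le_mul (Nat.le_succ m) (Nat.succ_le_succ (Nat.le_succ m))
    rw [List.range_succ, List.foldl_append, ih hm]
    simp only [List.foldl_cons, List.foldl_nil, List.map_append, List.map_cons, List.map_nil]
    have heven : m * (m + 1) / 2 * 2 = m * (m + 1) := Nat.div_mul_cancel (Nat.even_mul_succ_self m).two_dvd
    have hmul : (m + 1) * (m + 1 + 1) = m * (m + 1) + 2 * (m + 1) := by ring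
    have hsum : (m + 1) * (m + 1 + 1) / 2 = m * (m + 1) / 2 + (m + 1) := by omega
    simp only [Prod.mk.injEq]
    constructor
    · congr 1
      have hc : ((m * (m + 1) / 2 : Nat) : Int) + (m : Int) + 1 = (((m * (m + 1) / 2 + (m + 1) : Nat)) : Int) := by
        push_cast; ring
      rw [hc, PySem.List.slice_natCast]
      unfold pvOdds
      rw [Nat.add_sub_cancel_left]
      rw [pvChunk _ tot _ (m + 1) (by omega)]
      unfold pvRow
      congr 1
      apply List.map_congr_left
      intro k _
      push_cast
      have h2 : ((m * (m + 1) / 2 : Nat) : Int) * 2 = (m : Int) * ((m : Int) + 1) := by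
        exact_mod_cast congrArg (fun x : Nat => (x : Int)) heven
      omega
    · rw [hsum]
      push_cast
      ring

lemma pvB_eq (n : Nat) : odd_triangle_alt (n : Int) = (List.range n).map pvRow := by
  unfold odd_triangle_alt
  have hmax : max (n : Int) 0 = (n : Int) := max_eq_left (Int.natCast_nonneg n)
  simp only [hmax]
  have htot : PySem.Int.floordiv ((n : Int) * ((n : Int) + 1)) 2 = ((n * (n + 1) / 2 : Nat) : Int) := by
    rw [PySem.Int.floordiv_eq_ediv_of_pos (by norm_num)]
    push_cast
    omega
  rw [htot, PySem.List.pyRange_zero_natCast, PySem.List.pyRange_zero_natCast,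
    List.map_map, List.foldl_map]
  have hodds : (List.range (n * (n + 1) / 2)).map ((fun k => 2 * k + 1) ∘ fun k : Nat => (k : Int))
      = pvOdds (n * (n + 1) / 2) := by
    unfold pvOdds
    apply List.map_congr_left
    intro k _
    rfl
  rw [hodds]
  rw [pvB_fold (n * (n + 1) / 2) n le_rfl]

lemma pv_neg (depth : Int) (h : depth ≤ 0) : odd_triangle depth = odd_triangle_alt depth := by
  unfold odd_triangle odd_triangle_alt
  rw [PySem.List.pyRange_one_eq_nil h]
  simp

-- ===== VERDICT (by name: the statement is the Claim_ definition above) =====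
theorem odd_triangle_spec : Claim_equal_odd_triangle := by
  intro depth _
  unfold Spec_odd_triangle
  by_cases h : depth ≤ 0
  · exact pv_neg depth h
  · obtain ⟨n, rfl⟩ : ∃ n : Nat, depth = (n : Int) :=
      ⟨depth.toNat, (Int.toNat_of_nonneg (by omega)).symm⟩
    rw [pvA_eq, pvB_eq]
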